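-- pv_equiv track=rewrite | github.com/silverwolf-x/hosted-pypi | .github/scripts/generate_index.py | parse_sdist_filename
-- ===== SOURCE A (Python) =====
-- def parse_sdist_filename(filename: str):
--     """
--     Parse a source distribution filename into (name, version).
--     Supports .tar.gz and .zip formats.
--     """
--     for ext in (".tar.gz", ".zip"):
--         if filename.endswith(ext):
--             stem = filename[: -len(ext)]
--             parts = stem.split("-")
--             for i in range(1, len(parts)):
--                 if parts[i] and parts[i][0].isdigit():
--                     name = "-".join(parts[:i])
--                     version = "-".join(parts[i:])
--                     return name, version
--             break
--     return None, None
-- ===== SOURCE B (Python) =====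
-- import re
--
-- # Lazy first group stops at the first '-' that is immediately followed by an
-- # ASCII digit; [\s\S] (instead of '.') also crosses newlines, and [0-9]
-- # matches what str.isdigit matches on the ASCII domain.
-- _SDIST_RE = re.compile(r'([\s\S]*?)-([0-9][\s\S]*)\Z')
--
--
-- def parse_sdist_filename(filename: str):
--     for ext in (".tar.gz", ".zip"):
--         if filename.endswith(ext):
--             m = _SDIST_RE.match(filename[: -len(ext)])
--             if m:
--                 return m.group(1), m.group(2)
--             return None, None
--     return None, None
-- ===== Notes on version B (the rewrite author's own statement) =====
-- stated objective: idiomatic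
-- what changed: B drops the split-into-parts list and index loop of A and instead matches the stripped stem against one precompiled regex whose lazy group stops at the first dash that is followed by an ASCII digit, returning the two groups directly.
import Mathlib
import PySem

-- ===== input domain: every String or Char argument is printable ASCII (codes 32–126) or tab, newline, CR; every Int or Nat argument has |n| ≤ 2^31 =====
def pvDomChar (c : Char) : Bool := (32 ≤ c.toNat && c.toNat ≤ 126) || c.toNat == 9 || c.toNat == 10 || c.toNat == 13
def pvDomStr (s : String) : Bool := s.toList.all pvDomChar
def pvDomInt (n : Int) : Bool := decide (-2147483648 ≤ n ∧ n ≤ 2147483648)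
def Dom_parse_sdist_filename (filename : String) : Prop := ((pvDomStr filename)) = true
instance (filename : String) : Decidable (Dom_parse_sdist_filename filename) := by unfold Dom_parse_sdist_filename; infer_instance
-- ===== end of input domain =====

-- B replaces A's split-into-parts + index loop with one regex match (ported as a
-- single left-to-right scan for the first '-' followed by an ASCII digit); same
-- return value, objective: idiomatic.

-- ===== PORT A =====
-- inner loop: for i in range(1, len(parts)): if parts[i] and parts[i][0].isdigit(): return joins
def pvAFind (parts : List (List Char)) : List Int → Option String × Option String
  | [] => (none, none)
  | i :: is =>
    match (PySem.List.pyGet? parts i).getD [] with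
    | [] => pvAFind parts is
    | c :: _ =>
      if PySem.Chars.isdigit c then
        (some (String.ofList (PySem.Chars.join ['-'] (PySem.List.slice parts none (some i)))),
         some (String.ofList (PySem.Chars.join ['-'] (PySem.List.slice parts (some i) none))))
      else pvAFind parts is

-- outer loop: for ext in (".tar.gz", ".zip") with break-after-first-match = return (None, None)
def pvAExtLoop (f : String) : List String → Option String × Option String
  | [] => (none, none)
  | ext :: _rest =>
    if PySem.Str.endswith f ext then
      let stem := PySem.Str.slice f none (some (-(PySem.Str.len ext)))
      let parts := PySem.Chars.splitOn stem.toList ['-']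
      pvAFind parts (PySem.List.pyRange 1 (parts.length : Int) 1)
    else pvAExtLoop f _rest

def parse_sdist_filename (filename : String) : Option String × Option String :=
  pvAExtLoop filename [".tar.gz", ".zip"]

-- ===== PORT B =====
-- hand port of re.match(r'([\s\S]*?)-([0-9][\s\S]*)\Z', stem): exact for this pattern —
-- the lazy first group stops at the FIRST '-' immediately followed by [0-9];
-- returns (group1, group2) of the match, none when the pattern does not match.
def pvReMatch : List Char → Option (List Char × List Char)
  | [] => none
  | [_] => none
  | c :: d :: rest =>
    if c = '-' ∧ '0' ≤ d ∧ d ≤ '9' then some ([], d :: rest)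
    else
      match pvReMatch (d :: rest) with
      | some (p, v) => some (c :: p, v)
      | none => none

def pvBExtLoop (f : String) : List String → Option String × Option String
  | [] => (none, none)
  | ext :: _rest =>
    if PySem.Str.endswith f ext then
      match pvReMatch (PySem.Str.slice f none (some (-(PySem.Str.len ext)))).toList with
      | some (n, v) => (some (String.ofList n), some (String.ofList v))
      | none => (none, none)
    else pvBExtLoop f _rest

def parse_sdist_filename_alt (filename : String) : Option String × Option String :=
  pvBExtLoop filename [".tar.gz", ".zip"]

-- ===== PRECONDITION & SPEC =====
def Spec_parse_sdist_filename (filename : String) (out : Option String × Option String) : Prop := out = parse_sdist_filename_alt filename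
instance (filename : String) (out : Option String × Option String) : Decidable (Spec_parse_sdist_filename filename out) := by unfold Spec_parse_sdist_filename; infer_instance

-- ===== CLAIM (what is proved, stated in full; the proofs are below) =====
def Claim_equal_parse_sdist_filename : Prop := ∀ (filename : String), Dom_parse_sdist_filename filename → Spec_parse_sdist_filename filename (parse_sdist_filename filename)

-- ===== LEMMAS AND PROOFS =====

-- simple structural model of stem.split("-")
def pvSplitDash : List Char → List (List Char)
  | [] => [[]]
  | c :: rest => if c = '-' then [] :: pvSplitDash rest else (pvSplitDash rest).modifyHead (c :: ·)

-- A's inner loop, re-expressed over the remaining parts with the joined prefix text as accumulator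
def pvAScan (acc : List Char) : List (List Char) → Option (List Char × List Char)
  | [] => none
  | [] :: ps => pvAScan (acc ++ '-' :: []) ps
  | (c :: cs) :: ps =>
    if PySem.Chars.isdigit c then some (acc, PySem.Chars.join ['-'] ((c :: cs) :: ps))
    else pvAScan (acc ++ '-' :: c :: cs) ps

def pvConv : Option (List Char × List Char) → Option String × Option String
  | some (n, v) => (some (String.ofList n), some (String.ofList v))
  | none => (none, none)

theorem pvSplitDash_ne_nil (s : List Char) : pvSplitDash s ≠ [] := by
  induction s with
  | nil => simp [pvSplitDash]
  | cons c rest ih =>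
    simp only [pvSplitDash]
    split
    · simp
    · cases h : pvSplitDash rest with
      | nil => exact absurd h ih
      | cons q qs => simp [List.modifyHead]

theorem pvGo (l : List Char) : ∀ (fuel : Nat) (cur : List Char) (acc : List (List Char)),
    l.length < fuel →
    PySem.Chars.splitOn.go ['-'] fuel l cur acc
      = acc.reverse ++ (pvSplitDash l).modifyHead (cur.reverse ++ ·) := by
  induction l with
  | nil =>
    intro fuel cur acc h
    match fuel, h with
    | (f+1), _ => simp [PySem.Chars.splitOn.go, pvSplitDash]
  | cons c rest ih =>
    intro fuel cur acc h
    match fuel, h with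
    | (f+1), h =>
      rw [PySem.Chars.splitOn.go]
      by_cases hc : c = '-'
      · subst hc
        simp only [List.isPrefixOf, BEq.rfl, Bool.true_and, if_pos]
        simp only [List.length_cons, List.drop_succ_cons, List.length_nil, List.drop_zero]
        rw [ih f [] (cur.reverse :: acc) (by simp at h; omega)]
        simp [pvSplitDash, List.modifyHead_id]
        cases pvSplitDash rest <;> rfl
      · have : ¬ (['-'].isPrefixOf (c :: rest) = true) := by
          simp [List.isPrefixOf]; intro hco; exact absurd hco.symm hc
        rw [if_neg this]
        rw [ih f (c :: cur) acc (by simpa using h)]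
        simp [pvSplitDash, hc, Function.comp_def]

theorem pvSplitOn_eq (s : List Char) : PySem.Chars.splitOn s ['-'] = pvSplitDash s := by
  unfold PySem.Chars.splitOn
  rw [pvGo s (s.length + 1) [] [] (by omega)]
  simp only [List.reverse_nil, List.nil_append]
  cases pvSplitDash s <;> rfl

theorem pvJoin_cons_head (c : Char) (q : List Char) (qs : List (List Char)) :
    PySem.Chars.join ['-'] ((c :: q) :: qs) = c :: PySem.Chars.join ['-'] (q :: qs) := by
  cases qs with
  | nil => simp [PySem.Chars.join_singleton]
  | cons r rs => simp [PySem.Chars.join_cons_cons]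

theorem pvJoinDash_splitDash (s : List Char) :
    PySem.Chars.join ['-'] (pvSplitDash s) = s := by
  induction s with
  | nil => simp [pvSplitDash, PySem.Chars.join_singleton]
  | cons c rest ih =>
    simp only [pvSplitDash]
    cases h : pvSplitDash rest with
    | nil => exact absurd h (pvSplitDash_ne_nil rest)
    | cons q qs =>
      rw [h] at ih
      by_cases hc : c = '-'
      · subst hc
        simp only [reduceIte, PySem.Chars.join_cons_cons, List.nil_append,
          List.singleton_append, ih]
      · simp only [if_neg hc, List.modifyHead_cons, pvJoin_cons_head, ih]

theorem pvJoin_append_singleton (pre : List (List Char)) (p : List Char) (h : pre ≠ []) :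
    PySem.Chars.join ['-'] (pre ++ [p]) = PySem.Chars.join ['-'] pre ++ '-' :: p := by
  induction pre with
  | nil => exact absurd rfl h
  | cons x t ih =>
    cases t with
    | nil => simp [PySem.Chars.join_cons_cons, PySem.Chars.join_singleton]
    | cons y u =>
      have h2 := ih (by simp)
      simp only [List.cons_append] at h2 ⊢
      rw [PySem.Chars.join_cons_cons, PySem.Chars.join_cons_cons, h2]
      simp [List.append_assoc]

theorem pvBridge (suf : List (List Char)) : ∀ (pre : List (List Char)), pre ≠ [] →
    pvAFind (pre ++ suf) (PySem.List.pyRange (pre.length : Int) (((pre ++ suf).length : Int)) 1)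
      = pvConv (pvAScan (PySem.Chars.join ['-'] pre) suf) := by
  induction suf with
  | nil =>
    intro pre h
    have he : PySem.List.pyRange (pre.length : Int) ((pre ++ ([] : List (List Char))).length : Int) 1 = [] := by
      simp [PySem.List.pyRange]
    rw [he]
    rfl
  | cons p ps ih =>
    intro pre h
    have hlt : (pre.length : Int) < ((pre ++ p :: ps).length : Int) := by
      simp
    rw [PySem.List.pyRange_one_cons hlt]
    have hget : (PySem.List.pyGet? (pre ++ p :: ps) (pre.length : Int)).getD [] = p := by
      rw [PySem.List.pyGet?_natCast]
      simp [List.getElem?_append_right, Nat.sub_self]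
    have hsucc : (pre.length : Int) + 1 = ((pre ++ [p]).length : Int) := by
      simp
    have hassoc : pre ++ p :: ps = (pre ++ [p]) ++ ps := by simp
    cases p with
    | nil =>
      simp only [pvAFind, hget]
      rw [hsucc, hassoc, ih (pre ++ [[]]) (by simp)]
      simp only [pvAScan, pvJoin_append_singleton pre [] h]
    | cons c cs =>
      simp only [pvAFind, hget]
      by_cases hd : PySem.Chars.isdigit c
      · rw [if_pos hd]
        have h1 : PySem.List.slice (pre ++ (c :: cs) :: ps) none (some (pre.length : Int)) = pre := by
          rw [PySem.List.slice_to_natCast]; exact List.take_left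
        have h2 : PySem.List.slice (pre ++ (c :: cs) :: ps) (some (pre.length : Int)) none = (c :: cs) :: ps := by
          rw [PySem.List.slice_from_natCast]; exact List.drop_left
        rw [h1, h2]
        simp only [List.headI_cons, List.tail_cons, pvAScan, if_pos hd]
        rfl
      · rw [if_neg hd]
        rw [hsucc, hassoc, ih (pre ++ [c :: cs]) (by simp)]
        simp only [pvAScan, if_neg hd, pvJoin_append_singleton pre (c :: cs) h]

theorem pvMain (s : List Char) : ∀ (acc : List Char),
    pvAScan (acc ++ (pvSplitDash s).headI) (pvSplitDash s).tail
      = (pvReMatch s).map (fun nv => (acc ++ nv.1, nv.2)) := by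
  induction s with
  | nil => intro acc; simp [pvSplitDash, pvAScan, pvReMatch]
  | cons c rest ih =>
    intro acc
    by_cases hc : c = '-'
    · subst hc
      simp only [pvSplitDash, reduceIte, List.headI_cons, List.tail_cons, List.append_nil]
      cases hr : rest with
      | nil => simp [pvSplitDash, pvAScan, pvReMatch]
      | cons d r =>
        by_cases hdd : d = '-'
        · subst hdd
          -- first part of rest is empty; no digit guard fires
          simp only [pvSplitDash, reduceIte, pvAScan]
          have := ih (acc ++ ['-'])
          rw [hr] at this
          simp only [pvSplitDash, reduceIte, List.headI_cons, List.tail_cons, List.append_nil] at this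
          rw [this]
          simp only [pvReMatch]
          rw [if_neg (by decide : ¬(True ∧ '0' ≤ '-' ∧ '-' ≤ '9'))]
          cases pvReMatch ('-' :: r) with
          | none => rfl
          | some nv => simp
        · obtain ⟨q', qs', hq'⟩ : ∃ q' qs', pvSplitDash r = q' :: qs' := by
            cases hpp : pvSplitDash r with
            | nil => exact absurd hpp (pvSplitDash_ne_nil r)
            | cons a b => exact ⟨a, b, rfl⟩
          have hsplit : pvSplitDash (d :: r) = (d :: q') :: qs' := by
            simp [pvSplitDash, hdd, hq']
          rw [hsplit]
          by_cases hd : PySem.Chars.isdigit d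
          · simp only [List.headI_cons, List.tail_cons, pvAScan, if_pos hd]
            rw [← hsplit, pvJoinDash_splitDash]
            simp only [pvReMatch]
            simp only [PySem.Chars.isdigit, Bool.and_eq_true, decide_eq_true_eq] at hd
            rw [if_pos ⟨trivial, hd⟩]
            simp
          · simp only [List.headI_cons, List.tail_cons, pvAScan, if_neg hd]
            have := ih (acc ++ ['-'])
            rw [hr, hsplit] at this
            simp only [List.headI_cons, List.tail_cons] at this
            rw [show acc ++ '-' :: d :: q' = (acc ++ ['-']) ++ (d :: q') by simp] at *
            rw [this]
            simp only [pvReMatch]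
            rw [if_neg (fun hcon => hd (by simp [PySem.Chars.isdigit, hcon.2.1, hcon.2.2]))]
            cases pvReMatch (d :: r) with
            | none => rfl
            | some nv => obtain ⟨p, v⟩ := nv; simp
    · obtain ⟨q, qs, hq⟩ : ∃ q qs, pvSplitDash rest = q :: qs := by
        cases hpp : pvSplitDash rest with
        | nil => exact absurd hpp (pvSplitDash_ne_nil rest)
        | cons a b => exact ⟨a, b, rfl⟩
      simp only [pvSplitDash, if_neg hc, hq, List.modifyHead_cons, List.headI_cons, List.tail_cons]
      have := ih (acc ++ [c])
      rw [hq] at this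
      simp only [List.headI_cons, List.tail_cons] at this
      rw [show acc ++ c :: q = (acc ++ [c]) ++ q by simp, this]
      cases hr : rest with
      | nil =>
        rw [hr] at hq
        simp [pvSplitDash] at hq
        simp [pvReMatch, ← hq.1]
      | cons d r =>
        simp only [pvReMatch]
        have hng : ¬(c = '-' ∧ '0' ≤ d ∧ d ≤ '9') := by rintro ⟨h1, -⟩; exact hc h1
        rw [if_neg hng]
        cases pvReMatch (d :: r) with
        | none => rfl
        | some nv => simp

theorem pvCore (s : List Char) :
    pvAFind (PySem.Chars.splitOn s ['-'])
        (PySem.List.pyRange 1 ((PySem.Chars.splitOn s ['-']).length : Int) 1)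
      = pvConv (pvReMatch s) := by
  rw [pvSplitOn_eq]
  obtain ⟨q, qs, hq⟩ : ∃ q qs, pvSplitDash s = q :: qs := by
    cases hpp : pvSplitDash s with
    | nil => exact absurd hpp (pvSplitDash_ne_nil s)
    | cons a b => exact ⟨a, b, rfl⟩
  rw [hq]
  have hb := pvBridge qs [q] (by simp)
  simp only [List.singleton_append, List.length_singleton, Nat.cast_one] at hb
  rw [PySem.Chars.join_singleton] at hb
  rw [hb]
  have hm := pvMain s []
  rw [hq] at hm
  simp only [List.headI_cons, List.tail_cons, List.nil_append] at hm
  rw [hm]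
  cases pvReMatch s with
  | none => rfl
  | some nv => simp [pvConv]

theorem pvLoops (f : String) (exts : List String) : pvAExtLoop f exts = pvBExtLoop f exts := by
  induction exts with
  | nil => rfl
  | cons ext rest ih =>
    simp only [pvAExtLoop, pvBExtLoop]
    split
    · rw [pvCore]
      cases pvReMatch (PySem.Str.slice f none (some (-(PySem.Str.len ext)))).toList with
      | none => rfl
      | some nv => rfl
    · exact ih

-- ===== VERDICT (by name: the statement is the Claim_ definition above) =====
theorem parse_sdist_filename_spec : Claim_equal_parse_sdist_filename := by
  intro filename _
  unfold Spec_parse_sdist_filename parse_sdist_filename parse_sdist_filename_alt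
  exact pvLoops filename _
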